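-- pv_equiv track=rewrite | github.com/mascanio/Stack-Overflow | python/57215648.py | rec_a
-- ===== SOURCE A (Python) =====
-- def rec_a(a: list, i: int, b: list):
--     if i >= len(a):
--         return []
--     else:
--         # Put result of rb in a list in order to extend it
--         rb = [rec_b(a[i], b, 0)]
--         # Get rest of the result
--         ra = rec_a(a, i+1, b)
--         # Merge the rest of the result with the current one
--         rb.extend(ra)
--         return rb
--
-- def rec_b(elem: float, b: list, k: int):
--     if k >= len(b):
--         return None
--     elif b[k][0] <= elem <= b[k][1]:
--         return [b[k][0], elem, b[k][1]]
--     else: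
--         return rec_b(elem, b, k+1)
-- ===== SOURCE B (Python) =====
-- def rec_a(a: list, i: int, b: list):
--     # Interval-major traversal: walk the intervals back-to-front, overwriting matches,
--     # so the first (lowest-index) containing interval wins for every point.
--     pts = [a[j] for j in range(i, len(a))]
--     res = [None] * len(pts)
--     for iv in reversed(b):
--         lo, hi = iv[0], iv[1]
--         res = [[lo, x, hi] if lo <= x <= hi else r for x, r in zip(pts, res)]
--     return res
-- ===== Notes on version B (the rewrite author's own statement) =====
-- stated objective: alternative
-- what changed: Replaces the double recursion (recurse over points, recursively scan intervals for the first match) by an interval-major sweep: build the point list once, then walk the intervals back-to-front, overwriting each covered point's slot so the lowest-index containing interval wins; comprehensions replace deep Python recursion, a constant-factor speed-up.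
-- outside the precondition, e.g. on rec_a([0], 0, [[5]]): A returns [None], B raises IndexError; on rec_a([], 0, [[5]]): A returns [], B raises IndexError
import Mathlib
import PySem

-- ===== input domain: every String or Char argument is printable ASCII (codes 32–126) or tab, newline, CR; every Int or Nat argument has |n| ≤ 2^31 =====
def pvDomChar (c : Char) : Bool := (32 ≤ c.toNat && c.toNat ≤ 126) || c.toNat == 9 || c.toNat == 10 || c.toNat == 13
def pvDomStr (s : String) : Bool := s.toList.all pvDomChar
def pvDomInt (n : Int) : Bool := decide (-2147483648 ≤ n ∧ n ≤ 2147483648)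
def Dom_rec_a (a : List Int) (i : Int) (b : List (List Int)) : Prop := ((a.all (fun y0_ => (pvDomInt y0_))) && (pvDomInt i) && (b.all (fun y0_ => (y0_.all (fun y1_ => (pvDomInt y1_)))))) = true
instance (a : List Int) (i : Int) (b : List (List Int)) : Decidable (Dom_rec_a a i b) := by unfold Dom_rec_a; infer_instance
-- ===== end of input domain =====

-- B replaces the point-major double recursion by a back-to-front interval sweep
-- that overwrites covered slots; equivalence of the return values is proved below.

-- ===== PORT A =====
-- rec_b(elem, b, k); b[k][0] / b[k][1] use getD 0 — the IndexError cases are excluded by Pre_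
def rec_b_port (elem : Int) (b : List (List Int)) (k : Nat) : Option (List Int) :=
  if _h : b.length ≤ k then none
  else
    let iv := b.getD k []
    let lo := (PySem.List.pyGet? iv 0).getD 0
    let hi := (PySem.List.pyGet? iv 1).getD 0
    if lo ≤ elem ∧ elem ≤ hi then some [lo, elem, hi]
    else rec_b_port elem b (k + 1)
termination_by b.length - k
decreasing_by omega

-- a[i] with Python negative indexing; IndexError (i < -len a) is excluded by Pre_
def rec_a (a : List Int) (i : Int) (b : List (List Int)) : List (Option (List Int)) :=
  if _h : (a.length : Int) ≤ i then []
  else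
    rec_b_port ((PySem.List.pyGet? a i).getD 0) b 0 :: rec_a a (i + 1) b
termination_by ((a.length : Int) - i).toNat
decreasing_by omega

-- ===== PORT B =====
def rec_a_alt (a : List Int) (i : Int) (b : List (List Int)) : List (Option (List Int)) :=
  let pts := (PySem.List.pyRange i (a.length : Int) 1).map (fun j => (PySem.List.pyGet? a j).getD 0)
  let res0 : List (Option (List Int)) := List.replicate pts.length none
  b.reverse.foldl (fun res iv =>
    let lo := (PySem.List.pyGet? iv 0).getD 0
    let hi := (PySem.List.pyGet? iv 1).getD 0
    (pts.zip res).map (fun xr => if lo ≤ xr.1 ∧ xr.1 ≤ hi then some [lo, xr.1, hi] else xr.2)) res0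

-- ===== PRECONDITION & SPEC =====
-- Pre_ excludes inputs where Python raises IndexError: i < -len(a) (a[i] in A), and any interval
-- list with fewer than two entries (b[k][1], or b[k][0] on []); on a few such inputs A still returns
-- (a short interval never reached, or reached only with b[k][0] > elem) while B's unpacking raises.
def Pre_rec_a (a : List Int) (i : Int) (b : List (List Int)) : Prop :=
  (-(a.length : Int) ≤ i) ∧ ∀ iv ∈ b, 2 ≤ iv.length
instance (a : List Int) (i : Int) (b : List (List Int)) : Decidable (Pre_rec_a a i b) := by
  unfold Pre_rec_a; infer_instance
def pvWitness_rec_a : List Int × Int × List (List Int) := ([1, 5, 9], -2, [[0, 2], [4, 6]])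
def Spec_rec_a (a : List Int) (i : Int) (b : List (List Int)) (out : List (Option (List Int))) : Prop := out = rec_a_alt a i b
instance (a : List Int) (i : Int) (b : List (List Int)) (out : List (Option (List Int))) : Decidable (Spec_rec_a a i b out) := by unfold Spec_rec_a; infer_instance

-- ===== CLAIM (what is proved, stated in full; the proofs are below) =====
def Claim_equal_rec_a : Prop := ∀ (a : List Int) (i : Int) (b : List (List Int)), Dom_rec_a a i b → Pre_rec_a a i b → Spec_rec_a a i b (rec_a a i b)

-- ===== LEMMAS AND PROOFS =====

-- structural first-match scan; rec_b_port e b k scans the suffix b.drop k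
def rbList (e : Int) : List (List Int) → Option (List Int)
  | [] => none
  | iv :: bs =>
    let lo := (PySem.List.pyGet? iv 0).getD 0
    let hi := (PySem.List.pyGet? iv 1).getD 0
    if lo ≤ e ∧ e ≤ hi then some [lo, e, hi] else rbList e bs

theorem rbList_cons (e : Int) (iv : List Int) (bs : List (List Int)) :
    rbList e (iv :: bs) =
      (if (PySem.List.pyGet? iv 0).getD 0 ≤ e ∧ e ≤ (PySem.List.pyGet? iv 1).getD 0
       then some [(PySem.List.pyGet? iv 0).getD 0, e, (PySem.List.pyGet? iv 1).getD 0]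
       else rbList e bs) := rfl

theorem rec_b_port_eq_drop (e : Int) (b : List (List Int)) (k : Nat) :
    rec_b_port e b k = rbList e (b.drop k) := by
  fun_induction rec_b_port e b k with
  | case1 k h =>
    rw [List.drop_of_length_le h, rbList]
  | case2 k h iv lo hi hc =>
    have hk : k < b.length := by omega
    have hbk : b.getD k [] = b[k] := by
      simp [List.getD_eq_getElem?_getD, List.getElem?_eq_getElem hk]
    simp only [hi, lo, iv, hbk] at hc
    rw [List.drop_eq_getElem_cons hk, rbList_cons, if_pos hc]
    simp only [hi, lo, iv, hbk]
  | case3 k h iv lo hi hc ih =>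
    have hk : k < b.length := by omega
    have hbk : b.getD k [] = b[k] := by
      simp [List.getD_eq_getElem?_getD, List.getElem?_eq_getElem hk]
    simp only [hi, lo, iv, hbk] at hc
    rw [List.drop_eq_getElem_cons hk, rbList_cons, if_neg hc, ih]

theorem rec_a_eq_map (a : List Int) (i : Int) (b : List (List Int)) :
    rec_a a i b =
      (PySem.List.pyRange i (a.length : Int) 1).map
        (fun j => rbList ((PySem.List.pyGet? a j).getD 0) b) := by
  fun_induction rec_a a i b with
  | case1 i h =>
    rw [PySem.List.pyRange_one_eq_nil h]; rfl
  | case2 i h ih =>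
    rw [PySem.List.pyRange_one_cons (by omega), List.map_cons, rec_b_port_eq_drop, List.drop_zero, ih]

-- one interval-sweep step applied to a map-form accumulator
theorem step_map (pts : List Int) (f : Int → Option (List Int)) (lo hi : Int) :
    (pts.zip (pts.map f)).map
        (fun xr => if lo ≤ xr.1 ∧ xr.1 ≤ hi then some [lo, xr.1, hi] else xr.2)
      = pts.map (fun x => if lo ≤ x ∧ x ≤ hi then some [lo, x, hi] else f x) := by
  induction pts with
  | nil => rfl
  | cons x xs ih => simp [ih]

theorem sweep_eq_rbList (pts : List Int) (b : List (List Int)) :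
    (b.reverse.foldl (fun res iv =>
        let lo := (PySem.List.pyGet? iv 0).getD 0
        let hi := (PySem.List.pyGet? iv 1).getD 0
        (pts.zip res).map (fun xr => if lo ≤ xr.1 ∧ xr.1 ≤ hi then some [lo, xr.1, hi] else xr.2))
      (List.replicate pts.length none))
      = pts.map (fun x => rbList x b) := by
  rw [List.foldl_reverse]
  induction b with
  | nil =>
    simp [rbList, ← List.map_const']
  | cons iv bs ih =>
    rw [List.foldr_cons, ih, step_map]
    rfl

-- ===== VERDICT (by name: the statement is the Claim_ definition above) =====
theorem rec_a_spec : Claim_equal_rec_a := by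
  intro a i b _ _
  unfold Spec_rec_a rec_a_alt
  rw [rec_a_eq_map]
  have h := sweep_eq_rbList ((PySem.List.pyRange i (a.length : Int) 1).map (fun j => (PySem.List.pyGet? a j).getD 0)) b
  simp only [List.length_map] at h ⊢
  rw [h, List.map_map]
  rfl
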